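-- pv_equiv track=rewrite | github.com/burd5/codewars_python | palindromes_here_and_there.py | convert_palindromes
-- ===== SOURCE A (Python) =====
-- def convert_palindromes(numbers):
--     answer_arr = [];
--     for number in numbers:
--         if is_palindrome(str(number)):
--             answer_arr.append(1)
--         else:
--             answer_arr.append(0)
--     return answer_arr
--
-- def is_palindrome(number):
--     return number[::-1] == number
-- ===== SOURCE B (Python) =====
-- def convert_palindromes(numbers):
--     return [1 if _is_pal(str(n)) else 0 for n in numbers]
--
-- def _is_pal(s):
--     i, j = 0, len(s) - 1
--     while i < j:
--         if s[i] != s[j]: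
--             return False
--         i += 1
--         j -= 1
--     return True
-- ===== Notes on version B (the rewrite author's own statement) =====
-- stated objective: alternative
-- what changed: Replaces the reverse-a-copy-and-compare palindrome test inside an append loop by a two-pointer outside-in character scan with early exit, and builds the result as a comprehension/map instead of an accumulator list.
import Mathlib
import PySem

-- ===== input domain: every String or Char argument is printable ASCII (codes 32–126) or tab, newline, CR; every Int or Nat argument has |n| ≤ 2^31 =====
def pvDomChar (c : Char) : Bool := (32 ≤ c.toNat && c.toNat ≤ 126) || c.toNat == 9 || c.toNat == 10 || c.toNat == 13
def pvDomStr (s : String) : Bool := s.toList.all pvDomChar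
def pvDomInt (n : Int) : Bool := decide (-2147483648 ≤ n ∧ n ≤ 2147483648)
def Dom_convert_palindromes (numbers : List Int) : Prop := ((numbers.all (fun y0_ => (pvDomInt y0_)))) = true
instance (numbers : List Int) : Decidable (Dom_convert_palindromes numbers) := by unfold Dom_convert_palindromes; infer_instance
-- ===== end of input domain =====

-- B replaces reverse-and-compare inside an append loop by a two-pointer outside-in scan with a map; same cost (alternative decomposition).

-- ===== PORT A =====
-- is_palindrome(number): number[::-1] == number
def is_palindrome (number : String) : Bool :=
  PySem.Str.slice? number none none (-1) == some number

def convert_palindromes (numbers : List Int) : List Int :=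
  numbers.foldl (fun answer_arr number =>
    if is_palindrome (PySem.Int.toStr number) then answer_arr ++ [1]
    else answer_arr ++ [0]) []

-- ===== PORT B =====
-- _is_pal's while loop: i,j move inward, early exit on first mismatch
def isPalAux (s : List Char) (i j : Nat) : Bool :=
  if i < j then
    if s.getD i ' ' ≠ s.getD j ' ' then false
    else isPalAux s (i + 1) (j - 1)
  else true
termination_by j - i

def isPal (s : List Char) : Bool := isPalAux s 0 (s.length - 1)

def convert_palindromes_alt (numbers : List Int) : List Int :=
  numbers.map (fun n => if isPal (PySem.Int.toStr n).toList then 1 else 0)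

-- ===== PRECONDITION & SPEC =====
def Spec_convert_palindromes (numbers : List Int) (out : List Int) : Prop := out = convert_palindromes_alt numbers
instance (numbers : List Int) (out : List Int) : Decidable (Spec_convert_palindromes numbers out) := by unfold Spec_convert_palindromes; infer_instance

-- ===== CLAIM (what is proved, stated in full; the proofs are below) =====
def Claim_equal_convert_palindromes : Prop := ∀ (numbers : List Int), Dom_convert_palindromes numbers → Spec_convert_palindromes numbers (convert_palindromes numbers)

-- ===== LEMMAS AND PROOFS =====

-- two-pointer scan succeeds iff the window [i, j] is symmetric
theorem isPalAux_iff (s : List Char) : ∀ n i j, j - i ≤ n →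
    (isPalAux s i j = true ↔ ∀ k, i ≤ k → k ≤ j → s.getD k ' ' = s.getD (i + j - k) ' ') := by
  intro n
  induction n with
  | zero =>
    intro i j h
    rw [isPalAux]
    have : ¬ i < j := by omega
    simp only [this, if_false]
    constructor
    · intro _ k hik hkj
      have : k = i + j - k := by omega
      rw [← this]
    · intro _; trivial
  | succ m ih =>
    intro i j h
    rw [isPalAux]
    by_cases hij : i < j
    · simp only [hij, if_true]
      by_cases heq : s.getD i ' ' = s.getD j ' '
      · simp only [heq, ne_eq, not_true_eq_false, if_false]
        rw [ih (i + 1) (j - 1) (by omega)]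
        constructor
        · intro hmid k hik hkj
          by_cases hk : i + 1 ≤ k ∧ k ≤ j - 1
          · have := hmid k hk.1 hk.2
            have e : i + 1 + (j - 1) - k = i + j - k := by omega
            rwa [e] at this
          · have : k = i ∨ k = j := by omega
            rcases this with h1 | h1
            · have e : i + j - k = j := by omega
              rw [e, h1]; exact heq
            · have e : i + j - k = i := by omega
              rw [e, h1]; exact heq.symm
        · intro hall k hik hkj
          have := hall k (by omega) (by omega)
          have e : i + 1 + (j - 1) - k = i + j - k := by omega
          rw [e]; exact this
      · simp only [heq, ne_eq, not_false_eq_true, if_true]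
        constructor
        · intro hf; exact absurd hf (by simp)
        · intro hall
          have := hall i (le_refl i) (by omega)
          have e : i + j - i = j := by omega
          rw [e] at this
          exact absurd this heq
    · simp only [hij, if_false]
      constructor
      · intro _ k hik hkj
        have : k = i + j - k := by omega
        rw [← this]
      · intro _; trivial

theorem reverse_eq_iff (s : List Char) :
    (s.reverse = s) ↔ ∀ k, k < s.length → s.getD k ' ' = s.getD (s.length - 1 - k) ' ' := by
  constructor
  · intro h k hk
    have hk' : s.length - 1 - k < s.length := by omega
    rw [List.getD_eq_getElem s ' ' hk, List.getD_eq_getElem s ' ' hk']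
    have hrk : k < s.reverse.length := by simpa using hk
    calc s[k] = s.reverse[k]'hrk := (List.getElem_of_eq h hrk).symm
      _ = s[s.length - 1 - k] := List.getElem_reverse _
  · intro h
    apply List.ext_getElem (by simp)
    intro k h1 h2
    rw [List.getElem_reverse]
    have hk : s.length - 1 - k < s.length := by omega
    have := h k h2
    rw [List.getD_eq_getElem s ' ' h2, List.getD_eq_getElem s ' ' hk] at this
    exact this.symm

theorem isPal_eq_reverse (cs : List Char) : isPal cs = (cs.reverse == cs) := by
  unfold isPal
  cases hb : isPalAux cs 0 (cs.length - 1) with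
  | true =>
    have hall := (isPalAux_iff cs (cs.length - 1) 0 (cs.length - 1) (by omega)).mp hb
    have hr : cs.reverse = cs := by
      rw [reverse_eq_iff]
      intro k hk
      have := hall k (Nat.zero_le k) (by omega)
      simpa using this
    simp [hr]
  | false =>
    have hr : ¬ cs.reverse = cs := by
      intro hrev
      have hall := (reverse_eq_iff cs).mp hrev
      have ht : isPalAux cs 0 (cs.length - 1) = true := by
        rw [isPalAux_iff cs (cs.length - 1) 0 (cs.length - 1) (by omega)]
        intro k hik hkj
        rcases Nat.eq_zero_or_pos cs.length with h0 | h0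
        · have hnil : cs = [] := List.eq_nil_of_length_eq_zero h0
          subst hnil
          simp
        · have := hall k (by omega)
          simpa using this
      rw [hb] at ht
      exact Bool.false_ne_true ht
    simp [hr]

theorem is_palindrome_eq (s : String) : is_palindrome s = isPal s.toList := by
  unfold is_palindrome
  rw [PySem.Str.slice?_none_none_neg_one, isPal_eq_reverse]
  rcases eq_or_ne s.toList.reverse s.toList with h | h
  · simp [h]
  · have : String.ofList s.toList.reverse ≠ s := by
      intro he
      apply h
      have := congrArg String.toList he
      simpa using this
    simp [this, h]

theorem foldl_append_map (f : Int → Int) (xs : List Int) : ∀ acc,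
    xs.foldl (fun a x => a ++ [f x]) acc = acc ++ xs.map f := by
  induction xs with
  | nil => intro acc; simp
  | cons x xs ih => intro acc; simp [List.foldl, ih]

-- ===== VERDICT (by name: the statement is the Claim_ definition above) =====
theorem convert_palindromes_spec : Claim_equal_convert_palindromes := by
  intro numbers _
  unfold Spec_convert_palindromes convert_palindromes convert_palindromes_alt
  have hf : (fun (a : List Int) (number : Int) =>
      if is_palindrome (PySem.Int.toStr number) then a ++ [1] else a ++ [0]) =
      fun a number => a ++ [if isPal (PySem.Int.toStr number).toList then (1:Int) else 0] := by
    funext a number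
    rw [is_palindrome_eq]
    split <;> rfl
  rw [hf, foldl_append_map (fun n => if isPal (PySem.Int.toStr n).toList then 1 else 0) numbers []]
  simp
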